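/- GENERATED by mk_final_copies.py from the proof of the farm's unit `copy_frame` (farm:copy_frame.1: Proof.lean) as the
   re-elaboration sweep compiled it — do not edit. -/
import Vorbis.Spec.Units.copy_frame

open X86 X86.User Asan Vorbis

set_option maxRecDepth 4000
set_option maxHeartbeats 4000000

namespace Vorbis.Spec.copy_frame

/-- The signed value of a 64-bit quantity, by cases. -/
theorem toInt64_cases (x : BitVec 64) :
    (x.toNat < 2 ^ 63 ∧ x.toInt = (x.toNat : Int)) ∨ (2 ^ 63 ≤ x.toNat ∧ x.toInt = (x.toNat : Int) - 2 ^ 64) := by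
  rw [BitVec.toInt_eq_toNat_cond]
  have := x.isLt
  split
  · left
    omega
  · right
    omega

/-- A non-negative C `long` in a register: its signed value is its unsigned value, below 2^63. -/
theorem s64_of_nonneg (w : Word) (h : 0 ≤ Spec.s64 w) :
    w.toNat < 2 ^ 63 ∧ Spec.s64 w = (w.toNat : Int) := by
  unfold Spec.s64 at *
  have e : (Word.part Width.w64 w).toNat = w.toNat := by
    rw [X86.Word.part64]
    rfl
  rcases toInt64_cases (Word.part Width.w64 w) with ⟨h1, h2⟩ | ⟨h1, h2⟩
  · rw [e] at h1 h2
    exact ⟨h1, h2⟩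
  · rw [e] at h1 h2
    have := w.toNat_lt
    omega

/-- The signed value of a 32-bit quantity, by cases. -/
theorem toInt32_cases (x : BitVec 32) :
    (x.toNat < 2 ^ 31 ∧ x.toInt = (x.toNat : Int)) ∨ (2 ^ 31 ≤ x.toNat ∧ x.toInt = (x.toNat : Int) - 2 ^ 32) := by
  rw [BitVec.toInt_eq_toNat_cond]
  have := x.isLt
  split
  · left
    omega
  · right
    omega


/-- A number below 2^31 as a signed 32-bit value is itself. -/
theorem toInt_counter32 (i : Nat) (h : i < 2 ^ 31) : (BitVec.ofNat 32 i).toInt = (i : Int) := by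
  have e : (BitVec.ofNat 32 i).toNat = i := Spec.toNat_ofNat32 i (by omega)
  rw [Spec.toInt_of_lt _ (by omega), e]

/-- The low half of a register that holds a number below 2^31, as a number. -/
theorem part32_ofNat (c : Nat) (h : c < 2 ^ 31) : (Word.part Width.w32 (UInt64.ofNat c)).toNat = c := by
  rw [Vorbis.toNat_part32, UInt64.toNat_ofNat']
  omega

/-- The low half of a register that holds a number below 2^31, as a signed number. -/
theorem part32_ofNat_toInt (c : Nat) (h : c < 2 ^ 31) : (Word.part Width.w32 (UInt64.ofNat c)).toInt = (c : Int) := by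
  have e := part32_ofNat c h
  rw [Spec.toInt_of_lt _ (by omega), e]

/-- `lea r13, [rdx + rax*8]` with `rax = movsxd ebx`, `ebx = c ≥ 0`: the address of `chan[c]`. -/
theorem chan_slot (p : Word) (c : Nat) (hc : c < 2 ^ 31) (h : p.toNat + 8 * c < 2 ^ 64) :
    (p + Word.ofBV (BitVec.signExtend 64 (Word.part Width.w32 (UInt64.ofNat c))) * 8).toNat = p.toNat + 8 * c := by
  have e := part32_ofNat c hc
  have e8 : (8 : Word).toNat = 8 := rfl
  rw [UInt64.toNat_add, UInt64.toNat_mul, Spec.toNat_sext32 _ (by omega), e, e8]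
  omega

/-- `movsxd rbp, [i] ; shl rbp, 2 ; add rbp, chan[c]`: the address of `chan[c][i]`. -/
theorem sample_addr (i P : Nat) (hi : i < 2 ^ 31) (h : P + 4 * i < 2 ^ 64) :
    (Word.ofBV (BitVec.signExtend 64 (BitVec.ofNat 32 i)) <<< 2 + UInt64.ofNat P).toNat = P + 4 * i := by
  have e : (BitVec.ofNat 32 i).toNat = i := Spec.toNat_ofNat32 i (by omega)
  have e2 : (2 : Word).toNat = 2 := rfl
  have e4 : 2 ^ (2 % 64) = 4 := by decide
  rw [UInt64.toNat_add, UInt64.toNat_shiftLeft, Spec.toNat_sext32 _ (by omega), e, e2, UInt64.toNat_ofNat',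
    Nat.shiftLeft_eq, e4]
  omega

/-- A C `long` below 2^63 held in a register as a number: its signed value. -/
theorem s64_ofNat (n : Nat) (h : n < 2 ^ 63) : Spec.s64 (UInt64.ofNat n) = (n : Int) := by
  unfold Spec.s64
  have e : (Word.part Width.w64 (UInt64.ofNat n)).toNat = n := by
    rw [X86.Word.part64, UInt64.toNat_toBitVec, UInt64.toNat_ofNat']
    omega
  rcases toInt64_cases (Word.part Width.w64 (UInt64.ofNat n)) with ⟨h1, h2⟩ | ⟨h1, h2⟩
  · rw [h2, e]
  · omega

/-- `add dword [i], 1`: the incremented counter, as a number. -/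
theorem inc32_toNat (i : Nat) (h : i + 1 < 2 ^ 32) : (BitVec.ofNat 32 i + 1#32).toNat = i + 1 := by
  have e : (BitVec.ofNat 32 i).toNat = i := Spec.toNat_ofNat32 i (by omega)
  have e1 : (1#32).toNat = 1 := by decide
  rw [BitVec.toNat_add, e, e1]
  omega

/-- `add ebx, 1` on a register that holds the number `c`: it holds `c + 1`. -/
theorem inc32_word (c : Nat) (h : c + 1 < 2 ^ 31) :
    Word.ofBV (Word.part Width.w32 (UInt64.ofNat c) + 1#32) = UInt64.ofNat (c + 1) := by
  have e := part32_ofNat c (by omega)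
  have e1 : (1#32).toNat = 1 := by decide
  apply UInt64.eq_of_toBitVec_eq
  apply BitVec.eq_of_toNat_eq
  rw [UInt64.toNat_toBitVec, UInt64.toNat_toBitVec, Vorbis.toNat_ofBV32, BitVec.toNat_add, e, e1, UInt64.toNat_ofNat']
  omega

/-- A signed 32-bit value is below 2^31. -/
theorem toInt32_lt (x : BitVec 32) : x.toInt < 2 ^ 31 := by
  rcases toInt32_cases x with ⟨h1, h2⟩ | ⟨h1, h2⟩
  · omega
  · have := x.isLt
    omega

/-- The signed value of a register below 2^63 is its unsigned value (the walker's form of a 64-bit signed compare). -/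
theorem toInt_toBitVec (w : Word) (h : w.toNat < 2 ^ 63) : w.toBitVec.toInt = (w.toNat : Int) := by
  have e : w.toBitVec.toNat = w.toNat := UInt64.toNat_toBitVec w
  rcases toInt64_cases w.toBitVec with ⟨h1, h2⟩ | ⟨h1, h2⟩
  · rw [h2, e]
  · omega

/-- `lea r13, [rax + r12*4]`: the address of `dst[stored]`. -/
theorem dst_slot (p : Word) (s : Nat) (h : p.toNat + 4 * s < 2 ^ 64) :
    (p + UInt64.ofNat s * 4).toNat = p.toNat + 4 * s := by
  have e4 : (4 : Word).toNat = 4 := rfl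
  rw [UInt64.toNat_add, UInt64.toNat_mul, UInt64.toNat_ofNat', e4]
  omega

end Vorbis.Spec.copy_frame

/-- `copy_frame` (c/shim.c 26–40) satisfies its contract: two nested loops. The outer one (head 0x103289, counter `i` in the
stack slot `[rsp + 18H]`, measure `n − i`) is set up by `u_loop` without a postcondition, so its exit is walked to the `ret`;
the inner one (head 0x103233, counter `c` in `ebx`, measure `channels − c`) is set up by a second `u_loop` inside the body of
the first: its exit path (`i++`, 0x103284) ends at the outer head and states the OUTER invariant again by hand
(`Or.inl (Or.inr …)`), its two back edges (`stored ≥ room`: nothing stored; the store path with the three checks) by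
`u_loop_back`. The body is walked in three pieces, cut at the check calls 0x10324c and 0x10326a, where the pointer words
(`chan + 8c`, `chan[c] + 4i`, `dst + 4·stored`) are replaced by variables with a fact about their value. -/
theorem Vorbis.Spec.Worked.copy_frame_ok : Vorbis.Spec.copy_frame.Statement := by
  intro Lay hLay μ hμ u₀ hcode hload8 hload4 hstore4 others frames u ret he hpre
  v_entry he
  obtain ⟨hsh, hst0, hstle, hdst, hchan⟩ := hpre
  have hsp := hsh.rsp
  -- the two `long` arguments as numbers
  obtain ⟨hS63, hSe⟩ := Vorbis.Spec.copy_frame.s64_of_nonneg (u.reg .rsi) hst0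
  obtain ⟨hR63, hRe⟩ := Vorbis.Spec.copy_frame.s64_of_nonneg (u.reg .rdx) (Int.le_trans hst0 hstle)
  have hSR : (u.reg .rsi).toNat ≤ (u.reg .rdx).toNat := by
    rw [hSe, hRe] at hstle
    omega
  -- the pre's clauses over numbers
  rw [hRe, Int.toNat_natCast] at hdst
  simp only [hSe, hRe, Int.toNat_natCast, Spec.s32] at hchan
  -- 0x103200 (shim.c:28): six pushes, `sub rsp, 28H`, the spills, `i = 0`
  u_walk hcode [hμ.vendor] until [Vorbis.L.copy_frame.loop2] span [Vorbis.L.textLo, Vorbis.L.textHi] side (v_side)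
  -- the head of the outer loop, 0x103289 (shim.c:31 `for (i = 0; i < n; i++)`)
  obtain ⟨i, st, hi, hi31, w_r12', hst1, hst2⟩ : ∃ i st : Nat,
      s_10322e.mem.readLE (u.reg .rsp - 64) 4 = i ∧ i < 2 ^ 31 ∧
      s_10322e.reg .r12 = UInt64.ofNat st ∧ (u.reg .rsi).toNat ≤ st ∧ st ≤ (u.reg .rdx).toNat := by
    refine ⟨0, (u.reg .rsi).toNat, ?_, by decide, ?_, Nat.le_refl _, hSR⟩
    · u_resolve
    · rw [w_r12, UInt64.ofNat_toNat]
  -- the spills `n`, `dst`, `chan`, the six saved registers and the return address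
  have hn : s_10322e.mem.readLE (u.reg .rsp - 60) 4 = (Word.part Width.w32 (u.reg .r9)).toNat := by
    u_resolve
    exact Nat.mod_eq_of_lt (Word.part Width.w32 (u.reg .r9)).isLt
  have hpd : UInt64.ofNat (s_10322e.mem.readLE (u.reg .rsp - 80) 8) = u.reg .rdi := by u_resolve
  have hpc : UInt64.ofNat (s_10322e.mem.readLE (u.reg .rsp - 72) 8) = u.reg .rcx := by u_resolve
  have hs1 : UInt64.ofNat (s_10322e.mem.readLE (u.reg .rsp - 8) 8) = u.reg .r15 := by u_resolve
  have hs2 : UInt64.ofNat (s_10322e.mem.readLE (u.reg .rsp - 16) 8) = u.reg .r14 := by u_resolve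
  have hs3 : UInt64.ofNat (s_10322e.mem.readLE (u.reg .rsp - 24) 8) = u.reg .r13 := by u_resolve
  have hs4 : UInt64.ofNat (s_10322e.mem.readLE (u.reg .rsp - 32) 8) = u.reg .r12 := by u_resolve
  have hs5 : UInt64.ofNat (s_10322e.mem.readLE (u.reg .rsp - 40) 8) = u.reg .rbp := by u_resolve
  have hs6 : UInt64.ofNat (s_10322e.mem.readLE (u.reg .rsp - 48) 8) = u.reg .rbx := by u_resolve
  have hs0 : UInt64.ofNat (s_10322e.mem.readLE (u.reg .rsp) 8) = ret := by u_resolve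
  -- the footprint so far; no store to the shadow (as `Mem.EqOn`, the form `u_eqon` finds by `assumption`); DF
  have hsame : Mem.SameExcept [⟨(u.reg .rsp).toNat - 112, (u.reg .rsp).toNat⟩,
      ⟨(u.reg .rdi).toNat + 4 * (u.reg .rsi).toNat, (u.reg .rdi).toNat + 4 * (u.reg .rdx).toNat⟩] u.mem s_10322e.mem := by
    u_same
  have hun : Mem.EqOn 0xC00000 0xE00000 u.mem s_10322e.mem := by
    show ShadowUntouched u.mem s_10322e.mem
    v_untouched
  have hdf : s_10322e.flags .df = false := by
    rw [w_flags]
    simp only [X86.User.df_setStatus]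
    exact he_df
  replace w_kept := w_kept.mono_all
    (S' := [.rbx, .rbp, .r13, .rax, .rcx, .rdx, .rdi, .r14, .r15, .r12, .rsp]) (by rfl)
  clear w_mem w_flags w_r12
  u_loop [i, st] (fun v => ((Word.part Width.w32 (u.reg .r9)).toInt).toNat - v.mem.readLE (u.reg .rsp - 64) 4)
  u_walk hcode [hμ.vendor] until [Vorbis.L.copy_frame.loop1, Vorbis.L.copy_frame.loop2] span [Vorbis.L.textLo, Vorbis.L.textHi] side (v_side)
  · -- i ≥ n: the exit of the outer loop, walked to the `ret`
    refine ReachVia.done (Or.inl ?_)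
    v_returned
    refine ⟨?_, ?_, ?_⟩
    · -- no store went to the shadow
      show ShadowUntouched u.mem s_1032ab.mem
      rw [w_mem]
      exact hun
    · -- stored ≤ stored'
      show Spec.s64 (u.reg .rsi) ≤ Spec.s64 (s_1032ab.reg .rax)
      rw [w_rax, hSe, Vorbis.Spec.copy_frame.s64_ofNat st (by omega)]
      omega
    · -- stored' ≤ room
      show Spec.s64 (s_1032ab.reg .rax) ≤ Spec.s64 (u.reg .rdx)
      rw [w_rax, hRe, Vorbis.Spec.copy_frame.s64_ofNat st (by omega)]
      omega
  -- the head of the inner loop, 0x103233 (shim.c:32 `for (c = 0; c < channels; c++)`)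
  obtain ⟨c, st', w_rbx', hc31, w_r12', hst1', hst2'⟩ : ∃ c st' : Nat,
      s_103298.reg .rbx = UInt64.ofNat c ∧ c < 2 ^ 31 ∧
      s_103298.reg .r12 = UInt64.ofNat st' ∧ st ≤ st' ∧ st' ≤ (u.reg .rdx).toNat :=
    ⟨0, st, w_rbx, by decide, w_r12, Nat.le_refl _, hst2⟩
  have hi' : s_103298.mem.readLE (u.reg .rsp - 64) 4 = i := by
    rw [w_mem]
    exact hi
  replace hn : s_103298.mem.readLE (u.reg .rsp - 60) 4 = (Word.part Width.w32 (u.reg .r9)).toNat := by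
    rw [w_mem]
    exact hn
  replace hpd : UInt64.ofNat (s_103298.mem.readLE (u.reg .rsp - 80) 8) = u.reg .rdi := by
    rw [w_mem]
    exact hpd
  replace hpc : UInt64.ofNat (s_103298.mem.readLE (u.reg .rsp - 72) 8) = u.reg .rcx := by
    rw [w_mem]
    exact hpc
  replace hs1 : UInt64.ofNat (s_103298.mem.readLE (u.reg .rsp - 8) 8) = u.reg .r15 := by
    rw [w_mem]
    exact hs1
  replace hs2 : UInt64.ofNat (s_103298.mem.readLE (u.reg .rsp - 16) 8) = u.reg .r14 := by
    rw [w_mem]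
    exact hs2
  replace hs3 : UInt64.ofNat (s_103298.mem.readLE (u.reg .rsp - 24) 8) = u.reg .r13 := by
    rw [w_mem]
    exact hs3
  replace hs4 : UInt64.ofNat (s_103298.mem.readLE (u.reg .rsp - 32) 8) = u.reg .r12 := by
    rw [w_mem]
    exact hs4
  replace hs5 : UInt64.ofNat (s_103298.mem.readLE (u.reg .rsp - 40) 8) = u.reg .rbp := by
    rw [w_mem]
    exact hs5
  replace hs6 : UInt64.ofNat (s_103298.mem.readLE (u.reg .rsp - 48) 8) = u.reg .rbx := by
    rw [w_mem]
    exact hs6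
  replace hs0 : UInt64.ofNat (s_103298.mem.readLE (u.reg .rsp) 8) = ret := by
    rw [w_mem]
    exact hs0
  replace hsame : Mem.SameExcept [⟨(u.reg .rsp).toNat - 112, (u.reg .rsp).toNat⟩,
      ⟨(u.reg .rdi).toNat + 4 * (u.reg .rsi).toNat, (u.reg .rdi).toNat + 4 * (u.reg .rdx).toNat⟩] u.mem s_103298.mem := by
    rw [w_mem]
    exact hsame
  replace hun : Mem.EqOn 0xC00000 0xE00000 u.mem s_103298.mem := by
    rw [w_mem]
    exact hun
  replace hdf : s_103298.flags .df = false := by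
    rw [w_flags]
    simp only [X86.User.df_setStatus]
    exact hdf
  clear w_mem w_flags w_rbx w_r12 w_rcx
  u_loop [c, st'] (fun v => ((Word.part Width.w32 (u.reg .r8)).toInt).toNat - (v.reg .rbx).toNat)
  u_walk hcode [hμ.vendor] until [Vorbis.L.copy_frame.loop1, Vorbis.L.copy_frame.loop2, Vorbis.L.copy_frame.chk1] span [Vorbis.L.textLo, Vorbis.L.textHi] side (v_side)
  · -- c ≥ channels: the inner loop is left; `i++` (0x103284) and the back edge of the outer loop
    have hiN : (i : Int) < (Word.part Width.w32 (u.reg .r9)).toInt := by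
      rw [Vorbis.Spec.copy_frame.toInt_counter32 i hi31] at hbr_103291
      omega
    have hN31 := Vorbis.Spec.copy_frame.toInt32_lt (Word.part Width.w32 (u.reg .r9))
    have hnew : s_103284.mem.readLE (u.reg .rsp - 64) 4 = i + 1 := by
      rw [w_mem, Mem.readLE_writeLE_same _ _ _ _ (by decide), Vorbis.Spec.copy_frame.inc32_toNat i (by omega)]
      omega
    refine ReachVia.done (Or.inl (Or.inr ⟨⟨i + 1, st', ?_⟩, ?_⟩))
    · repeat' (with_reducible apply And.intro)
      all_goals try (first
        | (with_reducible assumption)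
        | (exact X86.User.RegsKept.mono_all (by with_reducible assumption) (by rfl))
        | (u_resolve; done)
        | u_same)
      · -- i + 1 ≤ n
        omega
      · omega
      · -- no store to the shadow
        show ShadowUntouched u.mem s_103284.mem
        v_untouched
      · rw [w_flags]
        simp only [X86.User.df_setStatus]
        exact hdf
    · -- the measure of the outer loop: n − i
      show ((Word.part Width.w32 (u.reg .r9)).toInt).toNat - s_103284.mem.readLE (u.reg .rsp - 64) 4 <
        ((Word.part Width.w32 (u.reg .r9)).toInt).toNat - s_10322e.mem.readLE (u.reg .rsp - 64) 4
      rw [hnew, hi]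
      omega
  · -- stored ≥ room: nothing is stored; `c++` and the back edge of the inner loop
    have hcC : (c : Int) < (Word.part Width.w32 (u.reg .r8)).toInt := by
      rw [Vorbis.Spec.copy_frame.part32_ofNat_toInt c hc31] at hbr_103236
      omega
    have hC31 := Vorbis.Spec.copy_frame.toInt32_lt (Word.part Width.w32 (u.reg .r8))
    have hrbx : s_103230.reg .rbx = UInt64.ofNat (c + 1) := by
      rw [w_rbx]
      exact Vorbis.Spec.copy_frame.inc32_word c (by omega)
    u_loop_back [c + 1, st']
    · omega
    · rw [w_flags]
      simp only [X86.User.df_setStatus]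
      exact hdf
    · -- the measure of the inner loop: channels − c
      rw [hrbx, UInt64.toNat_ofNat', UInt64.toNat_ofNat']
      omega
  -- 0x10324c: the check of the load of `chan[c]`
  have hcC : (c : Int) < (Word.part Width.w32 (u.reg .r8)).toInt := by
    rw [Vorbis.Spec.copy_frame.part32_ofNat_toInt c hc31] at hbr_103236
    omega
  have hiN : (i : Int) < (Word.part Width.w32 (u.reg .r9)).toInt := by
    rw [Vorbis.Spec.copy_frame.toInt_counter32 i hi31] at hbr_103291
    omega
  obtain ⟨hLc, hDc, hLp⟩ := hchan c hcC
  replace hLp := hLp (by omega)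
  obtain ⟨N, hN⟩ : ∃ N : Nat, ((Word.part Width.w32 (u.reg .r9)).toInt).toNat = N := ⟨_, rfl⟩
  obtain ⟨P, hP⟩ : ∃ P : Nat, u.mem.ptr ((u.reg .rcx).toNat + 8 * c) = P := ⟨_, rfl⟩
  rw [hN, hP] at hLp
  have hiN' : i < N := by omega
  have hwc := hLc.where_ hsh.inv hsh.offText (by decide) (by omega)
  have hwp := hLp.where_ hsh.inv hsh.offText (by omega) (by omega)
  obtain ⟨pc, hpcN, e13⟩ : ∃ pc : Word, pc.toNat = (u.reg .rcx).toNat + 8 * c ∧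
      u.reg .rcx + Word.ofBV (BitVec.signExtend 64 (Word.part Width.w32 (UInt64.ofNat c))) * 8 = pc :=
    ⟨_, Vorbis.Spec.copy_frame.chan_slot _ c hc31 (by omega), rfl⟩
  rw [e13] at w_r13 w_rdi
  have hload0 : u.mem.readLE pc 8 = P := by
    rw [← hP, eq_addr pc _ hpcN]
    rfl
  have hload : s_103298.mem.readLE pc 8 = P := by
    u_frame hload0
  u_walk hcode [hμ.vendor] until [Vorbis.L.copy_frame.loop1, Vorbis.L.copy_frame.loop2, Vorbis.L.copy_frame.chk2] span [Vorbis.L.textLo, Vorbis.L.textHi] side (v_side)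
  · -- the check of the load of `chan[c]`: the 8 bytes are live
    refine hLc.accSmall hsh.inv ?_ pc 8 (by decide) (by omega) (by omega)
    v_untouched
  -- 0x10326a: the check of the load of `chan[c][i]`
  obtain ⟨pq, hpqN, ebp⟩ : ∃ pq : Word, pq.toNat = P + 4 * i ∧
      Word.ofBV (BitVec.signExtend 64 (BitVec.ofNat 32 i)) <<< 2 + UInt64.ofNat P = pq :=
    ⟨_, Vorbis.Spec.copy_frame.sample_addr i P hi31 (by omega), rfl⟩
  rw [ebp] at w_rbp w_rdi
  -- … and where `dst[stored]` is: stored < room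
  have hstR : st' < (u.reg .rdx).toNat := by
    rw [Vorbis.Spec.copy_frame.toInt_toBitVec _ hR63, Vorbis.Spec.copy_frame.toInt_toBitVec _ (by
      rw [UInt64.toNat_ofNat']
      omega), UInt64.toNat_ofNat'] at hbr_10323b
    omega
  have hwd := hdst.where_ hsh.inv hsh.offText (by omega) (by omega)
  obtain ⟨pd, hpdN, e13'⟩ : ∃ pd : Word, pd.toNat = (u.reg .rdi).toNat + 4 * st' ∧
      u.reg .rdi + UInt64.ofNat st' * 4 = pd :=
    ⟨_, Vorbis.Spec.copy_frame.dst_slot _ st' (by omega), rfl⟩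
  rw [e13'] at w_r13
  have hdf67 : s_103267.flags .df = false := by
    rw [w_flags]
    simp only [X86.User.df_setStatus]
    exact w_df_10324c
  clear w_flags
  u_walk hcode [hμ.vendor] until [Vorbis.L.copy_frame.loop1, Vorbis.L.copy_frame.loop2] span [Vorbis.L.textLo, Vorbis.L.textHi] side (v_side)
  · -- the check of the load of `chan[c][i]`: the 4 bytes are live
    refine hLp.accSmall hsh.inv ?_ pq 4 (by decide) (by omega) (by omega)
    v_untouched
  · -- the check of the store to `dst[stored]`: the 4 bytes are live
    refine hdst.accSmall hsh.inv ?_ pd 4 (by decide) (by omega) (by omega)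
    v_untouched
  -- `stored++`, `c++` and the back edge of the inner loop
  have hC31 := Vorbis.Spec.copy_frame.toInt32_lt (Word.part Width.w32 (u.reg .r8))
  have hrbx : s_103230.reg .rbx = UInt64.ofNat (c + 1) := by
    rw [w_rbx]
    exact Vorbis.Spec.copy_frame.inc32_word c (by omega)
  have hr12 : s_103230.reg .r12 = UInt64.ofNat (st' + 1) := by
    rw [w_r12, UInt64.ofNat_add]
    rfl
  u_loop_back [c + 1, st' + 1]
  · omega
  · omega
  · omega
  · -- no store to the shadow
    show ShadowUntouched u.mem s_103230.mem
    v_untouched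
  · -- the direction flag: the three checks kept it, the `add`s wrote status flags only
    rw [w_flags]
    simp only [X86.User.df_setStatus]
    exact w_df_103275
  · -- the measure of the inner loop: channels − c
    rw [hrbx, UInt64.toNat_ofNat', UInt64.toNat_ofNat']
    omega
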